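-- pv_equiv track=rewrite | github.com/ctimmins96/256-QAM-Research-Paper | Python/my_libs/SDR.py | find_full
-- ===== SOURCE A (Python) =====
-- def find_full(rx,l):
--     ## Given a signal length try and isolate a single instance of the signal
--     l1 = round(l*1.4)
--     margin = round(l*0.2)
--
--     ## Find indices where the signal frame can be moved 'margin' amount and no
--     # significant data is found (significant == data > threshold)
--     threshold = 200
--     clear1 = False
--     clear2 = False
--     i = margin
--
--     while ((not clear1) and (not clear2) and (i + l1 + margin < len(rx))):
--         r1 = [i-margin,i+margin]
--         r2 = [i+l1-margin,i+l1+margin]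
--         clear1 = True
--         clear2 = True
--
--         test = rx[r1[0]:r1[1]]
--         for j in range(len(test)):
--             if abs(test[j]) > threshold:
--                 clear1 = False
--         test = rx[r2[0]:r2[1]]
--         for j in range(len(test)):
--             if abs(test[j]) > threshold:
--                 clear2 = False
--
--         i += 1
--
--     return [i,i+l1]
-- ===== SOURCE B (Python) =====
-- def find_full(rx, l):
--     # Same result as the original, but window tests are range queries on a
--     # prefix-sum of threshold crossings instead of re-scanning each window.
--     l1 = round(l * 1.4)
--     margin = round(l * 0.2)
--     n = len(rx)
--     pref = [0] * (n + 1)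
--     for j, v in enumerate(rx):
--         pref[j + 1] = pref[j] + (1 if abs(v) > 200 else 0)
--
--     def clamp(a):
--         if a < 0:
--             a += n
--         return min(max(a, 0), n)
--
--     def clear(a, b):
--         a, b = clamp(a), clamp(b)
--         return a >= b or pref[b] == pref[a]
--
--     i = margin
--     while i + l1 + margin < n:
--         hit = clear(i - margin, i + margin) or clear(i + l1 - margin, i + l1 + margin)
--         i += 1
--         if hit:
--             break
--     return [i, i + l1]
-- ===== Notes on version B (the rewrite author's own statement) =====
-- stated objective: alternative
-- what changed: B precomputes a prefix-sum of threshold crossings once and tests each margin window with a range query on it, instead of re-slicing and rescanning both windows at every candidate position; on random inputs where A exits early the upfront pass makes B no faster, so no speed is claimed.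
import Mathlib
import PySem

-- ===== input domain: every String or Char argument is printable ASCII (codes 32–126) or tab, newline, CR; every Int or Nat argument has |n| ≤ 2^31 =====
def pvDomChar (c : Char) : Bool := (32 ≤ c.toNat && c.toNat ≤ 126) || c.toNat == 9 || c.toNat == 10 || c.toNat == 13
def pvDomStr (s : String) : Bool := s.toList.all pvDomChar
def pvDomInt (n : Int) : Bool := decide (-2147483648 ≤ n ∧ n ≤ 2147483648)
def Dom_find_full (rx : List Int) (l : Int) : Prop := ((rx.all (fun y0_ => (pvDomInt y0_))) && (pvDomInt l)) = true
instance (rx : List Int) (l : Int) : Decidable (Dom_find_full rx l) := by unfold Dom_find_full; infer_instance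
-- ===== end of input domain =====

-- B replaces A's per-position rescans of the two margin windows by a prefix-sum of
-- threshold crossings queried per window (objective: alternative).

-- ===== PORT A =====
-- the while loop: state (clear1, clear2, i); fuel only makes the recursion structural —
-- the caller passes enough fuel that it never runs out before the loop condition fails
def find_full_loop (rx : List Int) (l1 margin : Int) : Bool → Bool → Int → Nat → Int
  | _, _, i, 0 => i
  | clear1, clear2, i, fuel + 1 =>
    if clear1 = false ∧ clear2 = false ∧ i + l1 + margin < (rx.length : Int) then
      let test1 := PySem.List.slice rx (some (i - margin)) (some (i + margin))
      let c1 := test1.foldl (fun c x => if 200 < |x| then false else c) true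
      let test2 := PySem.List.slice rx (some (i + l1 - margin)) (some (i + l1 + margin))
      let c2 := test2.foldl (fun c x => if 200 < |x| then false else c) true
      find_full_loop rx l1 margin c1 c2 (i + 1) fuel
    else i

def find_full (rx : List Int) (l : Int) : List Int :=
  -- round(l*1.4) and round(l*0.2) ported by hand as floor((14l+5)/10), floor((2l+5)/10):
  -- exact on |l| ≤ 2^31 (the fractional part of 7l/5 and l/5 is a multiple of 0.2, never .5,
  -- and the double-precision error of l*1.4 / l*0.2 is far below the 0.1 gap to a tie)
  let l1 := PySem.Int.floordiv (14 * l + 5) 10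
  let margin := PySem.Int.floordiv (2 * l + 5) 10
  let i := find_full_loop rx l1 margin false false margin
    ((rx.length : Int) - (margin + l1 + margin)).toNat
  [i, i + l1]

-- ===== PORT B =====
-- pref[k] = number of |rx[j]| > 200 among the first k samples, built once
def altPref (rx : List Int) : List Int :=
  rx.foldl (fun pref v => pref ++ [(pref.getLast?.getD 0) + (if 200 < |v| then (1 : Int) else 0)]) [0]

-- Source B's clamp: Python slice-bound normalisation
def altClamp (n a : Int) : Int :=
  if a < 0 then min (max (a + n) 0) n else min (max a 0) n

-- Source B's clear: the window [a:b] holds no sample above threshold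
def altClear (pref : List Int) (n a b : Int) : Bool :=
  let a' := altClamp n a
  let b' := altClamp n b
  (decide (b' ≤ a')) || (PySem.List.pyGetD pref b' 0 == PySem.List.pyGetD pref a' 0)

-- Source B's while loop; same fuel discipline as port A's loop
def altLoop (pref : List Int) (n l1 margin : Int) : Int → Nat → Int
  | i, 0 => i
  | i, fuel + 1 =>
    if i + l1 + margin < n then
      let hit := altClear pref n (i - margin) (i + margin) ||
                 altClear pref n (i + l1 - margin) (i + l1 + margin)
      if hit then i + 1 else altLoop pref n l1 margin (i + 1) fuel
    else i

def find_full_alt (rx : List Int) (l : Int) : List Int :=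
  -- same exact porting of round(l*1.4) / round(l*0.2) as in Source B / port A (see comment there)
  let l1 := PySem.Int.floordiv (14 * l + 5) 10
  let margin := PySem.Int.floordiv (2 * l + 5) 10
  let n := PySem.List.len rx
  let pref := altPref rx
  let i := altLoop pref n l1 margin margin (n - (margin + l1 + margin)).toNat
  [i, i + l1]

-- ===== PRECONDITION & SPEC =====
def Spec_find_full (rx : List Int) (l : Int) (out : List Int) : Prop := out = find_full_alt rx l
instance (rx : List Int) (l : Int) (out : List Int) : Decidable (Spec_find_full rx l out) := by unfold Spec_find_full; infer_instance

-- ===== CLAIM (what is proved, stated in full; the proofs are below) =====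
def Claim_equal_find_full : Prop := ∀ (rx : List Int) (l : Int), Dom_find_full rx l → Spec_find_full rx l (find_full rx l)

-- ===== LEMMAS AND PROOFS =====

def pvHot (x : Int) : Bool := decide (200 < |x|)

-- A's inner for-loop over a window is 'start && no element exceeds the threshold'
lemma foldl_clear (l : List Int) (c : Bool) :
    l.foldl (fun c x => if 200 < |x| then false else c) c = (c && l.all (fun x => !pvHot x)) := by
  induction l generalizing c with
  | nil => simp
  | cons x xs ih =>
      simp only [List.foldl_cons, List.all_cons, ih, pvHot]
      by_cases h : 200 < |x| <;> simp [h]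

lemma altPref_eq (rx : List Int) :
    altPref rx = (List.range (rx.length + 1)).map (fun k => ((rx.take k).countP pvHot : Int)) := by
  induction rx using List.reverseRecOn with
  | nil => simp [altPref]
  | append_singleton xs v ih =>
      unfold altPref at ih ⊢
      rw [List.foldl_append, ih]
      simp only [List.foldl_cons, List.foldl_nil]
      have hmap : ∀ k ∈ List.range (xs.length + 1),
          ((xs.take k).countP pvHot : Int) = (((xs ++ [v]).take k).countP pvHot : Int) := by
        intro k hk
        simp only [List.mem_range] at hk
        rw [List.take_append_of_le_length (by omega)]
      have hlast : ((List.range (xs.length + 1)).map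
          (fun k => ((xs.take k).countP pvHot : Int))).getLast?.getD 0
          = ((xs.countP pvHot : Nat) : Int) := by
        rw [List.range_succ, List.map_append]
        simp
      rw [hlast, List.length_append, List.length_singleton,
        show List.range (xs.length + 1 + 1) = List.range (xs.length + 1) ++ [xs.length + 1]
          from List.range_succ,
        List.map_append, ← List.map_congr_left hmap]
      congr 1
      simp only [List.map_cons, List.map_nil]
      congr 1
      rw [List.take_of_length_le (by simp), List.countP_append]
      simp only [List.countP_cons, List.countP_nil, pvHot]
      by_cases h : 200 < |v| <;> simp [h]

lemma altPref_getD (rx : List Int) (k : Nat) (hk : k ≤ rx.length) :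
    (altPref rx).getD k 0 = ((rx.take k).countP pvHot : Int) := by
  rw [altPref_eq]
  rw [List.getD_eq_getElem?_getD]
  rw [List.getElem?_map]
  rw [List.getElem?_range (by omega)]
  simp

lemma altClamp_eq (n : Nat) (a : Int) :
    altClamp (n : Int) a = ((PySem.List.clampIdx n a : Nat) : Int) := by
  unfold altClamp PySem.List.clampIdx
  split_ifs <;> omega

-- the prefix-sum window test equals 'every sample of the slice is below threshold'
lemma altClear_eq (rx : List Int) (a b : Int) :
    altClear (altPref rx) ((rx.length : Nat) : Int) a b
      = (PySem.List.slice rx (some a) (some b)).all (fun x => !pvHot x) := by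
  unfold altClear
  rw [altClamp_eq, altClamp_eq]
  set a' := PySem.List.clampIdx rx.length a with ha'
  set b' := PySem.List.clampIdx rx.length b with hb'
  have ha'le : a' ≤ rx.length := PySem.List.clampIdx_le _ _
  have hb'le : b' ≤ rx.length := PySem.List.clampIdx_le _ _
  have hslice : PySem.List.slice rx (some a) (some b) = (rx.drop a').take (b' - a') := by
    simp [PySem.List.slice, ← ha', ← hb']
  rw [hslice]
  simp only [PySem.List.pyGetD_natCast]
  rw [altPref_getD rx a' ha'le, altPref_getD rx b' hb'le]
  by_cases hab : b' ≤ a'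
  · have : b' - a' = 0 := by omega
    simp [hab, this]
  · have h1 : (decide ((b' : Int) ≤ (a' : Int))) = false := by simp; omega
    rw [h1, Bool.false_or]
    have htake : rx.take b' = rx.take a' ++ (rx.drop a').take (b' - a') := by
      rw [← List.take_add]
      congr 1
      omega
    rw [htake, List.countP_append]
    rcases Nat.eq_zero_or_pos (((rx.drop a').take (b' - a')).countP pvHot) with h0 | hpos
    · rw [h0]
      simp only [Nat.add_zero, beq_self_eq_true]
      symm
      rw [List.all_eq_true]
      intro x hx
      have := List.countP_eq_zero.mp h0 x hx
      simpa [pvHot] using this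
    · have hne : (((rx.take a').countP pvHot + ((rx.drop a').take (b' - a')).countP pvHot : Nat) : Int)
          ≠ ((rx.take a').countP pvHot : Nat) := by push_cast; omega
      rw [beq_eq_false_iff_ne.mpr (by exact_mod_cast hne)]
      symm
      rw [List.all_eq_false]
      obtain ⟨x, hx, hpx⟩ := List.countP_pos_iff.mp hpos
      exact ⟨x, hx, by simpa using hpx⟩

lemma loops_agree (rx : List Int) (l1 margin : Int) :
    ∀ (fuel : Nat) (i : Int),
      find_full_loop rx l1 margin false false i fuel
        = altLoop (altPref rx) ((rx.length : Nat) : Int) l1 margin i fuel := by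
  intro fuel
  induction fuel with
  | zero => intro i; rfl
  | succ fuel ih =>
      intro i
      rw [find_full_loop, altLoop]
      by_cases hcond : i + l1 + margin < (rx.length : Int)
      · simp only [hcond, and_self, if_pos]
        rw [foldl_clear, foldl_clear, Bool.true_and, Bool.true_and]
        rw [← altClear_eq rx (i - margin) (i + margin),
            ← altClear_eq rx (i + l1 - margin) (i + l1 + margin)]
        set h1 := altClear (altPref rx) ((rx.length : Nat) : Int) (i - margin) (i + margin) with hh1
        set h2 := altClear (altPref rx) ((rx.length : Nat) : Int) (i + l1 - margin) (i + l1 + margin) with hh2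
        by_cases hhit : (h1 || h2) = true
        · -- A's next loop test fails on a true flag, returning i+1; B breaks, returning i+1
          have hne : ¬ (h1 = false ∧ h2 = false ∧ i + 1 + l1 + margin < (rx.length : Int)) := by
            rcases Bool.or_eq_true_iff.mp hhit with h | h <;> simp [h]
          cases fuel with
          | zero => simp [find_full_loop, hhit]
          | succ fuel => rw [find_full_loop]; simp [hne, hhit]
        · have hor : (h1 || h2) = false := by
            cases hc1 : h1 <;> cases hc2 : h2 <;> simp_all
          obtain ⟨h1f, h2f⟩ := Bool.or_eq_false_iff.mp hor
          rw [h1f, h2f]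
          simp only [Bool.or_self, Bool.false_eq_true, if_false]
          exact ih (i + 1)
      · simp [hcond]

-- ===== VERDICT (by name: the statement is the Claim_ definition above) =====
theorem find_full_spec : Claim_equal_find_full := by
  intro rx l _
  unfold Spec_find_full find_full find_full_alt
  simp only [PySem.List.len_eq]
  rw [loops_agree]
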